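-- pv_equiv track=rewrite | github.com/drizztSun/common_project | PythonLeetcode/leetcodeM/1424_DiagonalTraverseII.py | doit_math
-- ===== SOURCE A (Python) =====
-- def doit_math(nums: list) -> list:
--
--     rows, cols = len(nums), max(len(nums[k]) for k in range(len(nums)))
--     lines = rows + cols - 1
--     ans = [[] for _ in range(lines)]
--
--     for i in range(rows-1, -1, -1):
--
--         for j in range(len(nums[i])):
--
--             ans[(i + j) % lines].append(nums[i][j])
--
--     res = []
--     for c in ans:
--         res.extend(c)
--     return res
-- ===== SOURCE B (Python) =====
-- def doit_math(nums: list) -> list: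
--     rows = len(nums)
--     cols = max(len(r) for r in nums)
--     res = []
--     for d in range(rows + cols - 1):
--         for i in range(min(d, rows - 1), -1, -1):
--             if d - i < len(nums[i]):
--                 res.append(nums[i][d - i])
--     return res
-- ===== Notes on version B (the rewrite author's own statement) =====
-- stated objective: simpler
-- what changed: A fills a bucket list row-major (i descending, j ascending) by appending into ans[(i+j)%lines] and then flattens the buckets; B has no intermediate buckets at all and emits the answer directly with a diagonal-major double loop (for each diagonal d, scan i from min(d, rows-1) down to 0 and output nums[i][d-i] when it exists).
-- outside the precondition, e.g. on doit_math([]): A raises ValueError, B raises ValueError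
import Mathlib
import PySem

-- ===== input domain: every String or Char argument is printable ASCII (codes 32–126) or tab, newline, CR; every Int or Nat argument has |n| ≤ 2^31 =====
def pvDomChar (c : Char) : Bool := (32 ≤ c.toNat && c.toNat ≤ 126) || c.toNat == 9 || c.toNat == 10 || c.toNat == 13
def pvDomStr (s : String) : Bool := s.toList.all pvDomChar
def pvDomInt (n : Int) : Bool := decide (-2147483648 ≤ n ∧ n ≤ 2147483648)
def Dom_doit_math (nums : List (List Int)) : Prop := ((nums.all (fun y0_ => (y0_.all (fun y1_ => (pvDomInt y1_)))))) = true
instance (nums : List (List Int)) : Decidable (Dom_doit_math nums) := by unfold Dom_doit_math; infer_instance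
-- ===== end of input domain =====

-- B replaces A's bucket array (row-major fill, then flatten) by a direct diagonal-major
-- double loop that emits each diagonal in order; objective: simpler (no intermediate buckets).

-- ===== PORT A =====
-- literal port of A; max(gen) is PySem.List.max? with identity key (.getD 0 is never the
-- none case on Pre_, i.e. nums ≠ []); ans[k].append is List.modify (the index (i+j)%lines
-- is always in [0, lines), so .toNat is exact here)
def doit_math (nums : List (List Int)) : List Int :=
  let rows : Int := nums.length
  let cols : Int := (PySem.List.max? ((PySem.List.pyRange 0 rows 1).map
      (fun k => ((PySem.List.pyGetD nums k []).length : Int))) (fun y => y)).getD 0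
  let lines : Int := rows + cols - 1
  let ans : List (List Int) := List.replicate lines.toNat []
  let ans := (PySem.List.pyRange (rows - 1) (-1) (-1)).foldl (fun ans i =>
    (PySem.List.pyRange 0 ((PySem.List.pyGetD nums i []).length : Int) 1).foldl (fun ans j =>
      ans.modify ((PySem.Int.mod (i + j) lines).toNat)
        (fun c => c ++ [PySem.List.pyGetD (PySem.List.pyGetD nums i []) j 0])) ans) ans
  ans.foldl (fun res c => res ++ c) []

-- ===== PORT B =====
def doit_math_alt (nums : List (List Int)) : List Int :=
  let rows : Int := nums.length
  let cols : Int := (PySem.List.max? (nums.map (fun r => (r.length : Int))) (fun y => y)).getD 0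
  (PySem.List.pyRange 0 (rows + cols - 1) 1).foldl (fun res d =>
    (PySem.List.pyRange (min d (rows - 1)) (-1) (-1)).foldl (fun res i =>
      if d - i < ((PySem.List.pyGetD nums i []).length : Int) then
        res ++ [PySem.List.pyGetD (PySem.List.pyGetD nums i []) (d - i) 0]
      else res) res) []

-- ===== PRECONDITION & SPEC =====
-- Pre_ excludes only nums = [], on which A's max() raises ValueError (B's max() raises too).
def Pre_doit_math (nums : List (List Int)) : Prop := nums ≠ []
instance (nums : List (List Int)) : Decidable (Pre_doit_math nums) := by
  unfold Pre_doit_math; infer_instance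
def pvWitness_doit_math : List (List Int) := [[1, 2], [3]]
def Spec_doit_math (nums : List (List Int)) (out : List Int) : Prop := out = doit_math_alt nums
instance (nums : List (List Int)) (out : List Int) : Decidable (Spec_doit_math nums out) := by
  unfold Spec_doit_math; infer_instance

-- ===== CLAIM (what is proved, stated in full; the proofs are below) =====
def Claim_equal_doit_math : Prop := ∀ (nums : List (List Int)), Dom_doit_math nums →
  Pre_doit_math nums → Spec_doit_math nums (doit_math nums)

-- ===== LEMMAS AND PROOFS =====

-- value at (i, j) and row length, as both ports read them
def pvVal (nums : List (List Int)) (i j : Int) : Int :=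
  PySem.List.pyGetD (PySem.List.pyGetD nums i []) j 0
def pvLen (nums : List (List Int)) (i : Int) : Int :=
  ((PySem.List.pyGetD nums i []).length : Int)

-- the common normal form: diagonal d, larger i first
def pvDiag (nums : List (List Int)) (d : Int) : List Int :=
  ((PySem.List.pyRange ((nums.length : Int) - 1) (-1) (-1)).filter
      (fun i => decide (0 ≤ d - i) && decide (d - i < pvLen nums i))).map
    (fun i => pvVal nums i (d - i))

lemma foldl_modify_length {α : Type} (L : List α) (f : α → Nat) (g : α → Int)
    (ans : List (List Int)) :
    (L.foldl (fun a x => a.modify (f x) (fun c => c ++ [g x])) ans).length = ans.length := by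
  induction L generalizing ans with
  | nil => rfl
  | cons x L ih => simp only [List.foldl_cons]; rw [ih, List.length_modify]

lemma foldl_modify_getD {α : Type} (L : List α) (f : α → Nat) (g : α → Int) :
    ∀ (ans : List (List Int)) (d : Nat), d < ans.length →
    (L.foldl (fun a x => a.modify (f x) (fun c => c ++ [g x])) ans).getD d [] =
      ans.getD d [] ++ (L.filter (fun x => f x == d)).map g := by
  induction L with
  | nil => intro ans d hd; simp
  | cons x L ih =>
    intro ans d hd
    have hlen : (ans.modify (f x) (fun c => c ++ [g x])).length = ans.length :=
      List.length_modify _ _ _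
    simp only [List.foldl_cons, List.filter_cons]
    rw [ih (ans.modify (f x) (fun c => c ++ [g x])) d (by rw [hlen]; exact hd)]
    have hmod : (ans.modify (f x) (fun c => c ++ [g x])).getD d [] =
        if f x = d then ans.getD d [] ++ [g x] else ans.getD d [] := by
      rw [List.getD_eq_getElem _ _ (by rw [hlen]; exact hd), List.getElem_modify,
        List.getD_eq_getElem _ _ hd]
    rw [hmod]
    by_cases h : f x = d
    · simp [h, List.append_assoc]
    · simp [h]

lemma flatMap_filter_map {α β γ : Type} (l : List α) (f : α → List β) (p : β → Bool)
    (g : β → γ) :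
    ((l.flatMap f).filter p).map g = l.flatMap (fun x => ((f x).filter p).map g) := by
  induction l with
  | nil => rfl
  | cons x l ih => simp only [List.flatMap_cons, List.filter_append, List.map_append, ih]

lemma filter_beq_pyRange (c : Int) : ∀ (n : Nat) (a : Int),
    (PySem.List.pyRange a (a + n) 1).filter (fun j => j == c) =
      if a ≤ c ∧ c < a + n then [c] else [] := by
  intro n
  induction n with
  | zero =>
    intro a
    rw [PySem.List.pyRange_one_eq_nil (by omega)]
    rw [if_neg (by omega)]
    rfl
  | succ n ih =>
    intro a
    rw [PySem.List.pyRange_one_cons (by push_cast; omega)]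
    have ht : a + ((n : Int) + 1) = (a + 1) + (n : Int) := by ring
    push_cast
    rw [ht, List.filter_cons, ih (a + 1)]
    by_cases h : a = c
    · subst h
      simp only [beq_self_eq_true, if_neg (by omega : ¬((a:Int) + 1 ≤ a ∧ a < a + 1 + n)),
        if_pos (by constructor <;> omega : a ≤ a ∧ a < a + 1 + (n:Int))]
      rfl
    · rw [if_neg (by simpa using h)]
      by_cases h2 : a + 1 ≤ c ∧ c < a + 1 + (n : Int)
      · rw [if_pos h2, if_pos (by omega)]
      · rw [if_neg h2, if_neg (by omega)]

-- descending range truncation: filtering i ≤ d out of [a..0] descending = [min d a..0] descending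
lemma filter_le_pyRange_desc (d : Int) (hd : 0 ≤ d) (q : Int → Bool) : ∀ (a : Int),
    (PySem.List.pyRange a (-1) (-1)).filter (fun i => decide (0 ≤ d - i) && q i) =
      (PySem.List.pyRange (min d a) (-1) (-1)).filter q := by
  have aux : ∀ (n : Nat),
      (PySem.List.pyRange ((n : Int) - 1) (-1) (-1)).filter
          (fun i => decide (0 ≤ d - i) && q i) =
        (PySem.List.pyRange (min d ((n : Int) - 1)) (-1) (-1)).filter q := by
    intro n
    induction n with
    | zero =>
      rw [PySem.List.pyRange_neg_one_eq_nil (by omega),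
        PySem.List.pyRange_neg_one_eq_nil (by omega)]
      rfl
    | succ n ih =>
      have ha : ((n : Int) + 1) - 1 = (n : Int) := by ring
      push_cast
      rw [ha, PySem.List.pyRange_neg_one_cons (by omega : (-1 : Int) < n), List.filter_cons]
      by_cases h : (n : Int) ≤ d
      · have hmin : min d (n : Int) = (n : Int) := by omega
        have hmin' : min d ((n : Int) - 1) = (n : Int) - 1 := by omega
        rw [hmin, PySem.List.pyRange_neg_one_cons (by omega : (-1 : Int) < n), List.filter_cons]
        have : decide (0 ≤ d - (n : Int)) = true := by simp; omega
        rw [this, Bool.true_and, ih, hmin']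
      · have hmin : min d (n : Int) = d := by omega
        have hmin' : min d ((n : Int) - 1) = d := by omega
        have : decide (0 ≤ d - (n : Int)) = false := by simp; omega
        rw [this, Bool.false_and, if_neg (by simp), ih, hmin', hmin]
  intro a
  by_cases ha : a ≤ -1
  · rw [PySem.List.pyRange_neg_one_eq_nil (by omega),
      PySem.List.pyRange_neg_one_eq_nil (by omega : min d a ≤ -1)]
    rfl
  · have : a = ((a.toNat + 1 : Nat) : Int) - 1 := by push_cast; omega
    rw [this, aux]

lemma foldl_append_acc (l : List (List Int)) : ∀ (acc : List Int),
    l.foldl (fun res c => res ++ c) acc = acc ++ l.flatten := by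
  induction l with
  | nil => intro acc; simp
  | cons x l ih => intro acc; simp only [List.foldl_cons, List.flatten_cons, ih, List.append_assoc]

lemma flatMap_ite_singleton {α β : Type} (l : List α) (p : α → Prop) [DecidablePred p]
    (v : α → β) :
    l.flatMap (fun x => if p x then [v x] else []) = (l.filter (fun x => decide (p x))).map v := by
  induction l with
  | nil => rfl
  | cons x l ih =>
    simp only [List.flatMap_cons, List.filter_cons, ih]
    by_cases h : p x <;> simp [h]

-- the pairs (i, j) in the order A's nested loop visits them, and A's bucket d
def pvPairs (nums : List (List Int)) (rows1 : Int) : List (Int × Int) :=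
  (PySem.List.pyRange rows1 (-1) (-1)).flatMap
    (fun i => (PySem.List.pyRange 0 ((PySem.List.pyGetD nums i []).length : Int) 1).map
      (fun j => (i, j)))

def pvBucket (nums : List (List Int)) (lines rows1 : Int) (d : Nat) : List Int :=
  ((pvPairs nums rows1).filter
      (fun x => (PySem.Int.mod (x.1 + x.2) lines).toNat == d)).map
    (fun x => pvVal nums x.1 x.2)

lemma nested_bucket (nums : List (List Int)) (lines rows1 : Int) :
    ((PySem.List.pyRange rows1 (-1) (-1)).foldl (fun ans i =>
        (PySem.List.pyRange 0 ((PySem.List.pyGetD nums i []).length : Int) 1).foldl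
          (fun ans j => ans.modify ((PySem.Int.mod (i + j) lines).toNat)
            (fun c => c ++ [PySem.List.pyGetD (PySem.List.pyGetD nums i []) j 0])) ans)
      (List.replicate lines.toNat [])).foldl (fun res c => res ++ c) [] =
    (List.range lines.toNat).flatMap (pvBucket nums lines rows1) := by
  have h1 : (PySem.List.pyRange rows1 (-1) (-1)).foldl (fun ans i =>
        (PySem.List.pyRange 0 ((PySem.List.pyGetD nums i []).length : Int) 1).foldl
          (fun ans j => ans.modify ((PySem.Int.mod (i + j) lines).toNat)
            (fun c => c ++ [PySem.List.pyGetD (PySem.List.pyGetD nums i []) j 0])) ans)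
      (List.replicate lines.toNat []) =
      (pvPairs nums rows1).foldl (fun a x =>
        a.modify ((PySem.Int.mod (x.1 + x.2) lines).toNat)
          (fun c => c ++ [pvVal nums x.1 x.2])) (List.replicate lines.toNat []) := by
    unfold pvPairs
    rw [List.foldl_flatMap]
    simp only [List.foldl_map]
    rfl
  rw [h1, foldl_append_acc, List.nil_append]
  have h2 : (pvPairs nums rows1).foldl (fun a x =>
        a.modify ((PySem.Int.mod (x.1 + x.2) lines).toNat)
          (fun c => c ++ [pvVal nums x.1 x.2])) (List.replicate lines.toNat []) =
      (List.range lines.toNat).map (pvBucket nums lines rows1) := by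
    apply List.ext_getElem
    · rw [foldl_modify_length, List.length_replicate, List.length_map, List.length_range]
    · intro n h1' h2'
      have hn : n < lines.toNat := by
        rw [foldl_modify_length, List.length_replicate] at h1'; exact h1'
      rw [← List.getD_eq_getElem _ ([] : List Int) h1',
        foldl_modify_getD _ _ _ _ n (by rw [List.length_replicate]; exact hn),
        List.getD_replicate _ hn, List.nil_append]
      simp only [List.getElem_map, List.getElem_range]
      rfl
  rw [h2, ← List.flatMap_def]

-- A's bucket d is the diagonal d, provided every row fits within lines
lemma bucket_eq_diag (nums : List (List Int)) (lines : Int) (d : Nat)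
    (hb : ∀ i : Int, 0 ≤ i → i < (nums.length : Int) →
      (nums.length : Int) + ((PySem.List.pyGetD nums i []).length : Int) - 1 ≤ lines) :
    pvBucket nums lines ((nums.length : Int) - 1) d = pvDiag nums (d : Int) := by
  unfold pvBucket pvPairs pvDiag
  rw [flatMap_filter_map]
  have hin : ∀ i ∈ PySem.List.pyRange ((nums.length : Int) - 1) (-1) (-1),
      ((((PySem.List.pyRange 0 ((PySem.List.pyGetD nums i []).length : Int) 1).map
          (fun j => (i, j))).filter
          (fun x => (PySem.Int.mod (x.1 + x.2) lines).toNat == d)).map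
        (fun x => pvVal nums x.1 x.2)) =
      (if 0 ≤ (d : Int) - i ∧ (d : Int) - i < ((PySem.List.pyGetD nums i []).length : Int)
        then [pvVal nums i ((d : Int) - i)] else []) := by
    intro i hi
    obtain ⟨hi1, hi2⟩ := PySem.List.mem_pyRange_neg_one.mp hi
    rw [List.filter_map, List.map_map]
    have hpred : ((PySem.List.pyRange 0 ((PySem.List.pyGetD nums i []).length : Int) 1).filter
          ((fun x : Int × Int => (PySem.Int.mod (x.1 + x.2) lines).toNat == d) ∘ (fun j => (i, j))))
        = (PySem.List.pyRange 0 ((PySem.List.pyGetD nums i []).length : Int) 1).filter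
          (fun j => j == (d : Int) - i) := by
      apply List.filter_congr
      intro j hj
      obtain ⟨hj0, hj1⟩ := PySem.List.mem_pyRange_one.mp hj
      have hlen := hb i (by omega) (by omega)
      have hlt : i + j < lines := by omega
      have hpos : 0 < lines := by omega
      simp only [Function.comp_apply]
      rw [PySem.Int.mod_eq_emod_of_pos hpos, Int.emod_eq_of_lt (by omega) hlt]
      rw [Bool.eq_iff_iff]
      simp only [beq_iff_eq]
      omega
    rw [hpred]
    have hfb := filter_beq_pyRange ((d : Int) - i) (PySem.List.pyGetD nums i []).length 0
    simp only [zero_add] at hfb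
    rw [hfb]
    split_ifs with hc
    · rfl
    · rfl
  rw [List.flatMap_congr hin, flatMap_ite_singleton]
  congr 1
  apply List.filter_congr
  intro i _
  rw [Bool.eq_iff_iff]
  simp only [Bool.and_eq_true, decide_eq_true_eq, pvLen]

-- A's side: doit_math = flatMap of diagonals
lemma doit_math_eq_diag (nums : List (List Int)) (h : nums ≠ []) :
    doit_math nums =
      (PySem.List.pyRange 0 ((nums.length : Int) +
        ((PySem.List.max? (nums.map (fun r => (r.length : Int))) (fun y => y)).getD 0) - 1) 1).flatMap
        (pvDiag nums) := by
  have hmapeq : (PySem.List.pyRange 0 (nums.length : Int) 1).map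
      (fun k => ((PySem.List.pyGetD nums k []).length : Int)) =
      nums.map (fun r => (r.length : Int)) := by
    rw [show (fun k => ((PySem.List.pyGetD nums k []).length : Int)) =
        (fun r : List Int => (r.length : Int)) ∘ (fun j => PySem.List.pyGetD nums j []) from rfl,
      ← List.map_map, PySem.List.map_pyGetD_pyRange_zero']
  obtain ⟨m, hm⟩ : ∃ m, PySem.List.max? (nums.map (fun r => (r.length : Int)))
      (fun y => y) = some m := by
    cases hmax : PySem.List.max? (nums.map (fun r => (r.length : Int))) (fun y => y) with
    | none =>
      exfalso
      exact h (List.map_eq_nil_iff.mp ((PySem.List.max?_eq_none_iff _ _).mp hmax))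
    | some m => exact ⟨m, rfl⟩
  have hm0 : 0 ≤ m := by
    obtain ⟨r, _, hr⟩ := List.mem_map.mp (PySem.List.max?_mem hm)
    omega
  have hbound : ∀ i : Int, 0 ≤ i → i < (nums.length : Int) →
      (nums.length : Int) + ((PySem.List.pyGetD nums i []).length : Int) - 1 ≤
        (nums.length : Int) +
          ((PySem.List.max? (nums.map (fun r => (r.length : Int))) (fun y => y)).getD 0) - 1 := by
    intro i h0 h1
    rw [hm]
    have hmem : ((PySem.List.pyGetD nums i []).length : Int) ∈
        nums.map (fun r => (r.length : Int)) := by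
      rw [PySem.List.pyGetD_eq_getElem nums ([] : List Int) h0 h1]
      exact List.mem_map.mpr ⟨_, List.getElem_mem _, rfl⟩
    have := PySem.List.max?_isMax hm _ hmem
    simp only [Option.getD_some]
    omega
  have hrows : 1 ≤ (nums.length : Int) := by
    have : nums.length ≠ 0 := fun hh => h (List.length_eq_zero_iff.mp hh)
    omega
  have hlines0 : 0 ≤ (nums.length : Int) +
      ((PySem.List.max? (nums.map (fun r => (r.length : Int))) (fun y => y)).getD 0) - 1 := by
    rw [hm]; simp only [Option.getD_some]; omega
  unfold doit_math
  simp only [hmapeq]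
  rw [nested_bucket]
  rw [show ((nums.length : Int) +
      ((PySem.List.max? (nums.map (fun r => (r.length : Int))) (fun y => y)).getD 0) - 1) =
      ((((nums.length : Int) +
      ((PySem.List.max? (nums.map (fun r => (r.length : Int))) (fun y => y)).getD 0) - 1).toNat : Nat) : Int)
    from (Int.toNat_of_nonneg hlines0).symm, PySem.List.pyRange_zero_natCast, List.flatMap_map]
  simp only [Int.toNat_natCast]
  apply List.flatMap_congr
  intro d _
  exact bucket_eq_diag nums _ d (by
    intro i h0 h1
    have := hbound i h0 h1
    rw [Int.toNat_of_nonneg hlines0]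
    exact this)

-- B's side
lemma doit_math_alt_eq_diag (nums : List (List Int)) :
    doit_math_alt nums =
      (PySem.List.pyRange 0 ((nums.length : Int) +
        ((PySem.List.max? (nums.map (fun r => (r.length : Int))) (fun y => y)).getD 0) - 1) 1).flatMap
        (pvDiag nums) := by
  have inner : ∀ (d : Int) (res : List Int),
      (PySem.List.pyRange (min d ((nums.length : Int) - 1)) (-1) (-1)).foldl
        (fun res i => if d - i < ((PySem.List.pyGetD nums i []).length : Int) then
          res ++ [PySem.List.pyGetD (PySem.List.pyGetD nums i []) (d - i) 0] else res) res =
      res ++ ((PySem.List.pyRange (min d ((nums.length : Int) - 1)) (-1) (-1)).filter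
          (fun i => decide (d - i < ((PySem.List.pyGetD nums i []).length : Int)))).map
        (fun i => PySem.List.pyGetD (PySem.List.pyGetD nums i []) (d - i) 0) := by
    intro d res
    exact PySem.List.foldl_append_ite _ _ _ _
  unfold doit_math_alt
  simp only [inner, PySem.List.foldl_append_eq_flatMap, List.nil_append]
  apply List.flatMap_congr
  intro d hd
  have hd0 : 0 ≤ d := (PySem.List.mem_pyRange_one.mp hd).1
  unfold pvDiag pvVal pvLen
  rw [filter_le_pyRange_desc d hd0]

-- ===== VERDICT (by name: the statement is the Claim_ definition above) =====
theorem doit_math_spec : Claim_equal_doit_math := by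
  intro nums _ hpre
  unfold Spec_doit_math
  rw [doit_math_eq_diag nums hpre, doit_math_alt_eq_diag nums]
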